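-- pv_equiv track=rewrite | github.com/odigos-io/odigos-opentelemetry-python | initializer/odigos_sampler.py | _match_rule_route_to_span
-- ===== SOURCE A (Python) =====
-- def _match_rule_route_to_span(rule_route: str, span_value: str) -> bool:
--     """
--     Match a sampling rule route (e.g. /item/{id}) against a span value, which can be either
--     a templated route (e.g. /item/{item_id}) or a full URL target (e.g. /item/123?param=hello).
--     Path param segments ({...}) in the rule are treated as wildcards.
--     """
--     span_value = span_value.split('?')[0]
--     rule_parts = [part for part in rule_route.split('/') if part]
--     span_parts = [part for part in span_value.split('/') if part]
--
--     if len(rule_parts) != len(span_parts):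
--         return False
--
--     # Traverse both rule and span segments
--     for i in range(len(rule_parts)):
--         # If we hit a path param in the rule, it matches any span segment
--         if rule_parts[i].startswith('{'):
--             continue
--         if rule_parts[i] != span_parts[i]:
--             return False
--
--     return True
-- ===== SOURCE B (Python) =====
-- def _match_rule_route_to_span(rule_route: str, span_value: str) -> bool:
--     """Recursive pairwise matcher: no length precheck, one simultaneous walk."""
--     def segs(s):
--         return [p for p in s.split('/') if p]
--
--     def go(rs, ss):
--         if not rs or not ss:
--             return (not rs) and (not ss)
--         return (rs[0].startswith('{') or rs[0] == ss[0]) and go(rs[1:], ss[1:])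
--
--     return go(segs(rule_route), segs(span_value.split('?')[0]))
-- ===== Notes on version B (the rewrite author's own statement) =====
-- stated objective: alternative
-- what changed: Replaces A's explicit length precheck plus indexed range-loop with early returns by a helper that recursively walks both segment lists simultaneously (length mismatch fails structurally), combining segment results with and/or.
import Mathlib
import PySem

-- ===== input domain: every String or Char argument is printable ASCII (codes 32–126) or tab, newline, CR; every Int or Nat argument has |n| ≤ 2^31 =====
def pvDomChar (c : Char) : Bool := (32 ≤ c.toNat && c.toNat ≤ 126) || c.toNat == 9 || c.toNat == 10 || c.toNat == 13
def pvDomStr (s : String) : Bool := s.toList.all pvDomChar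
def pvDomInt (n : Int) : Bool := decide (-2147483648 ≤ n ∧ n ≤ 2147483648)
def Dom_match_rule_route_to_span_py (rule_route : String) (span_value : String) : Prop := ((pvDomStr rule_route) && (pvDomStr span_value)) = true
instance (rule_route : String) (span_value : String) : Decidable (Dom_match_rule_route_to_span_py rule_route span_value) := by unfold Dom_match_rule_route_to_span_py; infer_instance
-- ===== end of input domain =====

-- B replaces A's length precheck + index loop by a single simultaneous structural recursion over the two segment lists (alternative decomposition, same cost).


-- ===== PORT A =====
-- the 'for i in range(len(rule_parts))' loop with its continue / early return
def pvALoop (rule_parts span_parts : List String) (i : Nat) : Bool :=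
  if i < rule_parts.length then
    if PySem.Str.startswith (rule_parts.getD i "") "{" then
      pvALoop rule_parts span_parts (i + 1)
    else if rule_parts.getD i "" ≠ span_parts.getD i "" then
      false
    else
      pvALoop rule_parts span_parts (i + 1)
  else
    true
termination_by rule_parts.length - i

def match_rule_route_to_span_py (rule_route : String) (span_value : String) : Bool :=
  let span_value := ((PySem.Str.split? span_value "?").getD []).getD 0 ""
  let rule_parts := ((PySem.Str.split? rule_route "/").getD []).filter (fun p => !(p == ""))
  let span_parts := ((PySem.Str.split? span_value "/").getD []).filter (fun p => !(p == ""))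
  if rule_parts.length ≠ span_parts.length then false
  else pvALoop rule_parts span_parts 0

-- ===== PORT B =====
-- segs: split on '/' and drop empty segments
def pvBSegs (s : String) : List String :=
  ((PySem.Str.split? s "/").getD []).filter (fun p => !(p == ""))

-- go: simultaneous structural recursion, no length precheck
def pvBGo : List String → List String → Bool
  | [], [] => true
  | [], _ :: _ => false
  | _ :: _, [] => false
  | r :: rt, s :: st => (PySem.Str.startswith r "{" || r == s) && pvBGo rt st

def match_rule_route_to_span_py_alt (rule_route : String) (span_value : String) : Bool :=
  pvBGo (pvBSegs rule_route) (pvBSegs (((PySem.Str.split? span_value "?").getD []).getD 0 ""))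

-- ===== PRECONDITION & SPEC =====
def Spec_match_rule_route_to_span_py (rule_route : String) (span_value : String) (out : Bool) : Prop := out = match_rule_route_to_span_py_alt rule_route span_value
instance (rule_route : String) (span_value : String) (out : Bool) : Decidable (Spec_match_rule_route_to_span_py rule_route span_value out) := by unfold Spec_match_rule_route_to_span_py; infer_instance

-- ===== CLAIM (what is proved, stated in full; the proofs are below) =====
def Claim_equal_match_rule_route_to_span_py : Prop := ∀ (rule_route : String) (span_value : String), Dom_match_rule_route_to_span_py rule_route span_value → Spec_match_rule_route_to_span_py rule_route span_value (match_rule_route_to_span_py rule_route span_value)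

-- ===== LEMMAS AND PROOFS =====
lemma pvBGo_ne_length (rs ss : List String) (h : rs.length ≠ ss.length) :
    pvBGo rs ss = false := by
  induction rs generalizing ss with
  | nil => cases ss with
    | nil => simp at h
    | cons s st => simp [pvBGo]
  | cons r rt ih => cases ss with
    | nil => simp [pvBGo]
    | cons s st =>
      simp only [pvBGo]
      rw [ih st (by simpa using h)]
      simp

lemma pvALoop_eq_pvBGo (rs ss : List String) (hlen : rs.length = ss.length) :
    ∀ n i, rs.length - i = n → pvALoop rs ss i = pvBGo (rs.drop i) (ss.drop i) := by
  intro n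
  induction n with
  | zero =>
    intro i h
    have hi : rs.length ≤ i := by omega
    unfold pvALoop
    rw [if_neg (by omega)]
    rw [List.drop_eq_nil_of_le hi, List.drop_eq_nil_of_le (by omega)]
    rfl
  | succ n ih =>
    intro i h
    have hi : i < rs.length := by omega
    have hi' : i < ss.length := by omega
    have hdr : rs.drop i = rs[i] :: rs.drop (i + 1) := List.drop_eq_getElem_cons hi
    have hds : ss.drop i = ss[i] :: ss.drop (i + 1) := List.drop_eq_getElem_cons hi'
    unfold pvALoop
    rw [if_pos hi, hdr, hds]
    simp only [pvBGo, List.getD_eq_getElem _ _ hi, List.getD_eq_getElem _ _ hi']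
    rw [ih (i + 1) (by omega)]
    by_cases hb : PySem.Chars.startswith rs[i].toList ['{'] = true
    · simp [hb]
    · simp only [Bool.not_eq_true] at hb
      by_cases he : rs[i] = ss[i]
      · simp [he]
      · simp [hb, he]

lemma pv_main_eq (rp sp : List String) :
    (if rp.length ≠ sp.length then false else pvALoop rp sp 0) = pvBGo rp sp := by
  by_cases hlen : rp.length = sp.length
  · rw [if_neg (by omega)]
    simpa using pvALoop_eq_pvBGo rp sp hlen rp.length 0 (by omega)
  · rw [if_pos hlen, pvBGo_ne_length rp sp hlen]

-- ===== VERDICT (by name: the statement is the Claim_ definition above) =====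
theorem match_rule_route_to_span_py_spec : Claim_equal_match_rule_route_to_span_py := by
  intro rule_route span_value _
  unfold Spec_match_rule_route_to_span_py match_rule_route_to_span_py
        match_rule_route_to_span_py_alt pvBSegs
  exact pv_main_eq _ _
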